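-- pv_equiv track=rewrite | github.com/Someone-That/Supreme-Database | get_data.py | get_name_from_line
-- ===== SOURCE A (Python) =====
-- def get_name_from_line(line):
--     '''gets unit name from line with syntax:     Description = "<LOC uaa0101_desc>Air Scout",'''
--     start_appending = False
--     output = ""
--     for i in line:
--         if start_appending and i == '"':
--             return output
--         if start_appending:
--             output = output + i
--         if i == ">":
--             start_appending = True
-- ===== SOURCE B (Python) =====
-- def get_name_from_line(line):
--     '''gets unit name from line with syntax:     Description = "<LOC uaa0101_desc>Air Scout",'''
--     i = line.find('>')
--     if i == -1:
--         return None
--     j = line.find('"', i + 1)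
--     if j == -1:
--         return None
--     return line[i + 1:j]
-- ===== Notes on version B (the rewrite author's own statement) =====
-- stated objective: faster
-- what changed: Replaces the per-character boolean-flag state machine that accumulates an output string with locating the two delimiter indices via str.find and returning a single slice.
import Mathlib
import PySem

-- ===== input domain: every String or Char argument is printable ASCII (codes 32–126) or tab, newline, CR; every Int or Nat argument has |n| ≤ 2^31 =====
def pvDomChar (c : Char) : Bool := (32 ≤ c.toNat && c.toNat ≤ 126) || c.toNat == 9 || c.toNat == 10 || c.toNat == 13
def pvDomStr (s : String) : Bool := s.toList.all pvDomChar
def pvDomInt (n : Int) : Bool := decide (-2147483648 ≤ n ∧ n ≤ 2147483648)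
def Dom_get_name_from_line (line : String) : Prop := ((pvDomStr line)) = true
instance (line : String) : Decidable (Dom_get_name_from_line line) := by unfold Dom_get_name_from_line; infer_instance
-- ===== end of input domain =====

-- B replaces A's per-character flag-toggling state machine by locating the two delimiter
-- indices with str.find and returning one slice (measured faster by a constant factor).

-- ===== PORT A =====
-- the for-loop with early return: state = (start_appending, output); falls off the end → None
def pvGoA : List Char → Bool → List Char → Option String
  | [], _, _ => none
  | c :: rest, sa, out =>
    if sa && (c == '"') then some (String.ofList out)
    else pvGoA rest (sa || (c == '>')) (if sa then out ++ [c] else out)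

def get_name_from_line (line : String) : Option String :=
  pvGoA line.toList false []

-- ===== PORT B =====
def get_name_from_line_alt (line : String) : Option String :=
  let i := PySem.Str.find line ">"
  if i = -1 then none
  else
    let j := PySem.Str.findFrom line "\"" (i + 1) none
    if j = -1 then none
    else some (PySem.Str.slice line (some (i + 1)) (some j))

-- ===== PRECONDITION & SPEC =====
def Spec_get_name_from_line (line : String) (out : Option String) : Prop := out = get_name_from_line_alt line
instance (line : String) (out : Option String) : Decidable (Spec_get_name_from_line line out) := by unfold Spec_get_name_from_line; infer_instance

-- ===== CLAIM (what is proved, stated in full; the proofs are below) =====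
def Claim_equal_get_name_from_line : Prop := ∀ (line : String), Dom_get_name_from_line line → Spec_get_name_from_line line (get_name_from_line line)

-- ===== LEMMAS AND PROOFS =====

theorem singleton_prefix_iff_cons (c : Char) (s : List Char) : [c] <+: s ↔ ∃ t, s = c :: t := by
  constructor
  · rintro ⟨t, rfl⟩; exact ⟨t, rfl⟩
  · rintro ⟨t, rfl⟩; exact ⟨t, rfl⟩

-- while the flag is on and no '"' remains, the loop falls off the end
theorem pvGoA_true_no_quote (l : List Char) (out : List Char) (h : '"' ∉ l) :
    pvGoA l true out = none := by
  induction l generalizing out with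
  | nil => rfl
  | cons c rest ih =>
    have hc : c ≠ '"' := by intro e; exact h (e ▸ List.mem_cons_self)
    simp only [pvGoA, Bool.true_and, beq_iff_eq, if_neg hc, if_pos trivial, Bool.true_or]
    exact ih (out ++ [c]) (fun hm => h (List.mem_cons_of_mem _ hm))

-- while the flag is on, the loop returns out ++ the chars before the first '"'
theorem pvGoA_true_quote (l : List Char) (out : List Char) (h : '"' ∈ l) :
    pvGoA l true out = some (String.ofList (out ++ l.takeWhile (fun x => x ≠ '"'))) := by
  induction l generalizing out with
  | nil => simp at h
  | cons c rest ih =>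
    by_cases hc : c = '"'
    · subst hc; simp [pvGoA]
    · have hm : '"' ∈ rest := by cases h with
        | head => exact absurd rfl hc
        | tail _ h => exact h
      simp only [pvGoA, Bool.true_and, beq_iff_eq, if_neg hc, if_pos trivial, Bool.true_or]
      rw [ih (out ++ [c]) hm]
      simp [hc]

-- with the flag off and no '>' ahead, the loop falls off the end
theorem pvGoA_false_no_gt (l : List Char) (out : List Char) (h : '>' ∉ l) :
    pvGoA l false out = none := by
  induction l generalizing out with
  | nil => rfl
  | cons c rest ih =>
    have hc : c ≠ '>' := by intro e; exact h (e ▸ List.mem_cons_self)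
    have hb : (c == '>') = false := by simp [hc]
    simp only [pvGoA, Bool.false_and, Bool.false_eq_true, if_false, Bool.false_or, hb]
    exact ih out (fun hm => h (List.mem_cons_of_mem _ hm))

-- the flag turns on exactly at the first '>'
theorem pvGoA_false_split (p rest : List Char) (out : List Char) (h : '>' ∉ p) :
    pvGoA (p ++ '>' :: rest) false out = pvGoA rest true out := by
  induction p with
  | nil => simp [pvGoA]
  | cons c t ih =>
    have hc : c ≠ '>' := by intro e; exact h (e ▸ List.mem_cons_self)
    have hb : (c == '>') = false := by simp [hc]
    simp only [List.cons_append, pvGoA, Bool.false_and, Bool.false_eq_true, if_false, Bool.false_or, hb]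
    exact ih (fun hm => h (List.mem_cons_of_mem _ hm))

theorem takeWhile_eq_take_first (d : List Char) (c : Char) (f : Nat) (hf : f < d.length)
    (h1 : d[f] = c) (h2 : ∀ k (hk : k < f), d[k] ≠ c) :
    d.takeWhile (fun x => x ≠ c) = d.take f := by
  induction d generalizing f with
  | nil => simp at hf
  | cons a t ih =>
    cases f with
    | zero => simp at h1; simp [h1]
    | succ m =>
      have ha : a ≠ c := h2 0 (Nat.succ_pos _)
      simp [ha, List.take_succ_cons]
      simpa using ih m (by simpa using hf) (by simpa using h1) (fun k hk => by
        have := h2 (k+1) (by omega); simpa using this)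

-- find on a one-character needle: the index of the first occurrence
theorem find_singleton_spec (s : List Char) (c : Char) (h : PySem.Chars.find s [c] ≠ -1) :
    ∃ f : Nat, PySem.Chars.find s [c] = (f : Int) ∧ s[f]? = some c ∧ ∀ k, k < f → s[k]? ≠ some c := by
  have h0 : 0 ≤ PySem.Chars.find s [c] := by
    have := PySem.Chars.neg_one_le_find s [c]; omega
  obtain ⟨hpre, hmin⟩ := PySem.Chars.find_spec (s := s) (sub := [c]) h0
  refine ⟨(PySem.Chars.find s [c]).toNat, (Int.toNat_of_nonneg h0).symm, ?_, ?_⟩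
  · obtain ⟨t, ht⟩ := (singleton_prefix_iff_cons c _).mp hpre
    rw [← List.head?_drop, ht]; rfl
  · intro k hk hko
    apply hmin k hk
    rw [singleton_prefix_iff_cons]
    rcases hd : s.drop k with _ | ⟨a, t⟩
    · rw [← List.head?_drop, hd] at hko; simp at hko
    · rw [← List.head?_drop, hd] at hko
      have : c = a := by simpa using hko.symm
      exact ⟨t, by rw [this]⟩

-- ===== VERDICT (by name: the statement is the Claim_ definition above) =====
theorem get_name_from_line_spec : Claim_equal_get_name_from_line := by
  intro line _
  unfold Spec_get_name_from_line get_name_from_line get_name_from_line_alt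
  simp only [PySem.Str.find_eq, PySem.Str.findFrom_eq]
  have ht : ">".toList = ['>'] := rfl
  have hq : "\"".toList = ['"'] := rfl
  rw [ht, hq]
  set s := line.toList with hs
  by_cases h1 : PySem.Chars.find s ['>'] = -1
  · -- no '>' in the line: both sides are None
    have hno : '>' ∉ s := by
      intro hm
      exact ((PySem.Chars.find_eq_neg_one_iff s ['>']).mp h1) ((List.singleton_infix_iff '>' s).mpr hm)
    rw [if_pos h1]
    exact pvGoA_false_no_gt s [] hno
  · -- '>' found at index i: A scans on from i+1 with the flag set; B searches '"' from i+1
    obtain ⟨i, hfi, hgi, hmini⟩ := find_singleton_spec s '>' h1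
    have hilen : i < s.length := by
      by_contra hc
      rw [List.getElem?_eq_none (by omega)] at hgi; simp at hgi
    have hsplit : s = s.take i ++ '>' :: s.drop (i + 1) := by
      conv_lhs => rw [← List.take_append_drop i s]
      congr 1
      have : s.drop i = s[i] :: s.drop (i + 1) := List.drop_eq_getElem_cons hilen
      rw [this, List.getElem?_eq_getElem hilen] at *
      simp at hgi
      rw [this, hgi]
    have hnotake : '>' ∉ s.take i := by
      intro hm
      obtain ⟨k, hk, hsk⟩ := List.getElem_of_mem hm
      have hk' : k < i := by simp at hk; omega
      have hkl : k < s.length := by simp at hk; omega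
      simp at hsk
      exact hmini k hk' (by rw [List.getElem?_eq_getElem hkl, hsk])
    have hA : pvGoA s false [] = pvGoA (s.drop (i + 1)) true [] := by
      conv_lhs => rw [hsplit]
      exact pvGoA_false_split _ _ _ hnotake
    rw [if_neg h1, hfi]
    have hcast : (i : Int) + 1 = ((i + 1 : Nat) : Int) := by push_cast; ring
    rw [hcast, PySem.Chars.findFrom_natCast s ['"'] (i + 1) (by omega)]
    by_cases h2 : PySem.Chars.find (s.drop (i + 1)) ['"'] = -1
    · rw [if_pos (by rw [h2]; simp)]
      have hnoq : '"' ∉ s.drop (i + 1) := by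
        intro hm
        exact ((PySem.Chars.find_eq_neg_one_iff (s.drop (i+1)) ['"']).mp h2)
          ((List.singleton_infix_iff '"' _).mpr hm)
      rw [hA]
      exact pvGoA_true_no_quote _ [] hnoq
    · obtain ⟨f, hff, hgf, hminf⟩ := find_singleton_spec (s.drop (i + 1)) '"' h2
      have hflen : f < (s.drop (i + 1)).length := by
        by_contra hc
        rw [List.getElem?_eq_none (by omega)] at hgf; simp at hgf
      rw [hff, if_neg (show ¬((f : Int) = -1) by omega),
          if_neg (show ¬(((i + 1 : Nat) : Int) + (f : Int) = -1) by push_cast; omega)]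
      -- A side: the chars up to the first '"'
      have hquote : '"' ∈ s.drop (i + 1) := List.mem_of_getElem? hgf
      rw [hA, pvGoA_true_quote _ [] hquote]
      -- B side: the slice s[i+1 : i+1+f]
      have htw : (s.drop (i + 1)).takeWhile (fun x => x ≠ '"') = (s.drop (i + 1)).take f := by
        apply takeWhile_eq_take_first _ _ _ hflen
        · have := List.getElem?_eq_getElem hflen; rw [this] at hgf; simpa using hgf
        · intro k hk
          have hkl : k < (s.drop (i + 1)).length := by omega
          have := hminf k hk
          rw [List.getElem?_eq_getElem hkl] at this
          intro e; exact this (by rw [e])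
      have hslice : PySem.Str.slice line (some ((i + 1 : Nat) : Int)) (some (((i + 1 : Nat) : Int) + (f : Int))) =
          String.ofList ((s.drop (i + 1)).take f) := by
        have hsl : (PySem.Str.slice line (some ((i + 1 : Nat) : Int)) (some (((i + 1 : Nat) : Int) + (f : Int)))).toList
            = (s.drop (i + 1)).take f := by
          have : (PySem.Str.slice line (some ((i + 1 : Nat) : Int)) (some (((i + 1 : Nat) : Int) + (f : Int)))).toList
              = PySem.List.slice line.toList (some ((i + 1 : Nat) : Int)) (some (((i + 1 : Nat) : Int) + (f : Int))) := by
            simp [pysem]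
          rw [this, ← hs, PySem.List.slice_natCast_add]
        exact Eq.trans (String.ofList_toList).symm (congrArg String.ofList hsl)
      rw [hslice, ← htw]
      simp
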